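-- pv_equiv track=rewrite | github.com/narock/agu_analytics | preprint/agu_create_disambiguated_data.py | exactMatchFor
-- ===== SOURCE A (Python) =====
-- def exactMatchFor(email, authors):
--
--     found = False
--     primaryEmail = ""
--     for key, emails in authors.items():
--         if email in emails:
--             found = True
--             primaryEmail = key
--             break
--
--     return found, primaryEmail
-- ===== SOURCE B (Python) =====
-- def exactMatchFor(email, authors):
--     owner = {}
--     for key, emails in authors.items():
--         for e in emails:
--             owner.setdefault(e, key)
--     if email in owner:
--         return True, owner[email]
--     return False, ""
-- ===== Notes on version B (the rewrite author's own statement) =====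
-- stated objective: alternative
-- what changed: Replaces the early-breaking key-by-key scan with building an inverted email->key index once (setdefault keeps the first owning key) followed by a single lookup.
import Mathlib
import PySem

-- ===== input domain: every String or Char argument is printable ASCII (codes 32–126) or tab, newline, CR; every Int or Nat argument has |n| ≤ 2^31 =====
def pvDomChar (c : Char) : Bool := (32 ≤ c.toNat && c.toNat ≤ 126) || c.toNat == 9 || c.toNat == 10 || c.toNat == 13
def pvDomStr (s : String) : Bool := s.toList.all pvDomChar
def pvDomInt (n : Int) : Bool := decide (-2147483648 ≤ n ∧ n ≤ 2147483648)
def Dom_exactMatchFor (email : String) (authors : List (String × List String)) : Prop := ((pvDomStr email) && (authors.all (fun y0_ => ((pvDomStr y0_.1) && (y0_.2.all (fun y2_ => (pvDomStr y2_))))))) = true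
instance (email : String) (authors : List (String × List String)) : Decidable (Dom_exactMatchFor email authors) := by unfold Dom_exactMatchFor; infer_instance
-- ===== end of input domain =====

-- B replaces A's early-breaking scan over the keys with a one-shot inverted index
-- (email -> first owning key, via setdefault) followed by a single lookup; alternative
-- decomposition, same asymptotic cost, identical return value.

-- ===== PORT A =====
-- the for-loop with break: first pair whose email list contains `email`
def exactMatchForLoop (email : String) : List (String × List String) → Bool × String
  | [] => (false, "")
  | (key, emails) :: rest =>
      if email ∈ emails then (true, key) else exactMatchForLoop email rest

def exactMatchFor (email : String) (authors : List (String × List String)) : Bool × String :=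
  exactMatchForLoop email authors

-- ===== PORT B =====
def exactMatchFor_alt (email : String) (authors : List (String × List String)) : Bool × String :=
  let owner : PySem.Dict String String :=
    authors.foldl (fun d ke => ke.2.foldl (fun d e => d.setdefault e ke.1) d) PySem.Dict.empty
  match owner.get? email with
  | some k => (true, k)
  | none => (false, "")

-- ===== PRECONDITION & SPEC =====
def Spec_exactMatchFor (email : String) (authors : List (String × List String)) (out : Bool × String) : Prop := out = exactMatchFor_alt email authors
instance (email : String) (authors : List (String × List String)) (out : Bool × String) : Decidable (Spec_exactMatchFor email authors out) := by unfold Spec_exactMatchFor; infer_instance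

-- ===== CLAIM (what is proved, stated in full; the proofs are below) =====
def Claim_equal_exactMatchFor : Prop := ∀ (email : String) (authors : List (String × List String)), Dom_exactMatchFor email authors → Spec_exactMatchFor email authors (exactMatchFor email authors)

-- ===== LEMMAS AND PROOFS =====

-- the loop's result as an Option: the first key whose list contains email
def pvScan (email : String) : List (String × List String) → Option String
  | [] => none
  | (key, emails) :: rest => if email ∈ emails then some key else pvScan email rest

theorem loop_eq_scan (email : String) (authors : List (String × List String)) :
    exactMatchForLoop email authors =
      match pvScan email authors with
      | some k => (true, k)
      | none => (false, "") := by
  induction authors with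
  | nil => rfl
  | cons p rest ih =>
      obtain ⟨key, emails⟩ := p
      simp only [exactMatchForLoop, pvScan]
      split_ifs with h <;> simp [ih]

theorem setdefault_get?_point (d : PySem.Dict String String) (e k email : String) :
    (d.setdefault e k).get? email =
      if email = e ∧ d.get? e = none then some k else d.get? email := by
  by_cases hc : d.contains e = true
  · rw [PySem.Dict.setdefault_of_contains d k hc]
    have hne : d.get? e ≠ none := by
      simp [PySem.Dict.get?_eq_none_iff_contains, hc]
    split_ifs with h
    · exact absurd h.2 hne
    · rfl
  · have hc' : d.contains e = false := by simpa using hc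
    have hnone : d.get? e = none := (PySem.Dict.get?_eq_none_iff_contains d e).mpr hc'
    rw [PySem.Dict.setdefault_of_not_contains d k hc', PySem.Dict.get?_insert]
    split_ifs with h1 h2 h3
    · rfl
    · exact absurd ⟨h1, hnone⟩ h2
    · exact absurd h3.1 h1
    · rfl

theorem inner_fold_get? (email k : String) (emails : List String)
    (d : PySem.Dict String String) :
    (emails.foldl (fun d e => d.setdefault e k) d).get? email =
      if email ∈ emails ∧ d.get? email = none then some k else d.get? email := by
  induction emails generalizing d with
  | nil => simp
  | cons e rest ih =>
      simp only [List.foldl_cons, ih, setdefault_get?_point]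
      by_cases he : email = e
      · subst he
        by_cases hd : d.get? email = none <;> simp [hd]
      · by_cases hr : email ∈ rest <;> simp [hr, he]

theorem outer_fold_get? (email : String) (authors : List (String × List String))
    (d : PySem.Dict String String) :
    (authors.foldl (fun d ke => ke.2.foldl (fun d e => d.setdefault e ke.1) d) d).get? email =
      (d.get? email).or (pvScan email authors) := by
  induction authors generalizing d with
  | nil => simp [pvScan]
  | cons p rest ih =>
      obtain ⟨key, emails⟩ := p
      simp only [List.foldl_cons, ih, inner_fold_get?, pvScan]
      by_cases hm : email ∈ emails
      · by_cases hd : d.get? email = none <;> simp [hm, hd]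
        · cases h : d.get? email <;> simp_all
      · by_cases hd : d.get? email = none <;> simp [hm, hd]

-- ===== VERDICT (by name: the statement is the Claim_ definition above) =====
theorem exactMatchFor_spec : Claim_equal_exactMatchFor := by
  intro email authors _
  show exactMatchFor email authors = exactMatchFor_alt email authors
  simp only [exactMatchFor, exactMatchFor_alt, outer_fold_get?, loop_eq_scan,
    PySem.Dict.get?_empty, Option.none_or]
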